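-- pv_equiv track=rewrite | github.com/matchms/matchms | matchms/metadata_entry_testing.py | is_valid_inchikey
-- ===== SOURCE A (Python) =====
-- def is_valid_inchikey(inchikey):
--     """Return True if input string has format of inchikey.
--
--     This functions test if string has correct format of:
--     "XXXXXXXXXXXXXXX-XXXXXXXXXX-X",
--     with "X" being a letter of the alphabet.
--
--     Args:
--     ----
--     inchikey: str
--         Input string to test if it has format of inchikey.
--     """
--     if not isinstance(inchikey, str):
--         return False
--
--     # Harmonize string
--     inchikey = inchikey.upper().replace('"', '').replace(' ', '')
--     # Test if string looks like inchikey
--     if not len(inchikey) == 27: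
--         return False
--
--     if not inchikey[14] == inchikey[25] == "-":
--         return False
--
--     return sum([char.isalpha() for char in inchikey]) == 25
-- ===== SOURCE B (Python) =====
-- def is_valid_inchikey(inchikey):
--     """Return True if input string has format of inchikey."""
--     if not isinstance(inchikey, str):
--         return False
--     s = inchikey.upper().replace('"', '').replace(' ', '')
--     return (len(s) == 27
--             and s[:14].isalpha()
--             and s[14] == '-'
--             and s[15:25].isalpha()
--             and s[25] == '-'
--             and s[26:].isalpha())
-- ===== Notes on version B (the rewrite author's own statement) =====
-- stated objective: simpler
-- what changed: Replaces the two index-based separator checks plus a global summed per-character isalpha comprehension by a direct segment-wise check: length 27, separator characters at positions 14 and 25, and the three delimited slices (of lengths 14, 10, 1) each alphabetic.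
import Mathlib
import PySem

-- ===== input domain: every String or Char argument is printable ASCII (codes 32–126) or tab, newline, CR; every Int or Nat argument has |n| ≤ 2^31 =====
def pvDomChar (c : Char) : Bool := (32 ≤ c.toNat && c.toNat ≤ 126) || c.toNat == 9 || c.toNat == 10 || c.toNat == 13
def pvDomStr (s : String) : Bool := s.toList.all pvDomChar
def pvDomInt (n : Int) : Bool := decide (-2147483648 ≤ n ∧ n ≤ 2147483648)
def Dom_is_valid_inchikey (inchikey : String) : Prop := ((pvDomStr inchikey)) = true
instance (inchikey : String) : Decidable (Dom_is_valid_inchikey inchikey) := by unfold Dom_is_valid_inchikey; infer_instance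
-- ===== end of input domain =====

-- B replaces A's two index checks plus the summed per-character isalpha comprehension by a
-- segment-wise check of the three dash-separated slices (simpler decomposition, same cost).

-- ===== PORT A =====
def is_valid_inchikey (inchikey : String) : Bool :=
  -- inchikey = inchikey.upper().replace('"', '').replace(' ', '')
  let t : List Char :=
    PySem.Chars.replace (PySem.Chars.replace (PySem.Chars.upper inchikey.toList) ['"'] []) [' '] []
  -- if not len(inchikey) == 27: return False
  if ¬ (t.length = 27) then false
  else
    -- if not inchikey[14] == inchikey[25] == "-": return False
    match PySem.List.pyGet? t (14 : Int), PySem.List.pyGet? t (25 : Int) with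
    | some c14, some c25 =>
      if ¬ (c14 = '-' ∧ c25 = '-') then false
      else
        -- return sum([char.isalpha() for char in inchikey]) == 25
        decide ((t.map (fun c => PySem.Chars.isalpha c)).foldl
          (fun acc b => if b then acc + 1 else acc) (0 : Int) = 25)
    | _, _ => false  -- unreachable: both indices are in range once len = 27 holds

-- ===== PORT B =====
def is_valid_inchikey_alt (inchikey : String) : Bool :=
  -- s = inchikey.upper().replace('"', '').replace(' ', '')
  let t : List Char :=
    PySem.Chars.replace (PySem.Chars.replace (PySem.Chars.upper inchikey.toList) ['"'] []) [' '] []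
  -- len(s) == 27 and s[:14].isalpha() and s[14] == '-' and s[15:25].isalpha()
  --   and s[25] == '-' and s[26:].isalpha()
  decide (t.length = 27)
    && PySem.Chars.strIsalpha (PySem.List.slice t none (some (14 : Int)))
    && decide (PySem.List.pyGet? t (14 : Int) = some '-')
    && PySem.Chars.strIsalpha (PySem.List.slice t (some (15 : Int)) (some (25 : Int)))
    && decide (PySem.List.pyGet? t (25 : Int) = some '-')
    && PySem.Chars.strIsalpha (PySem.List.slice t (some (26 : Int)) none)

-- ===== PRECONDITION & SPEC =====
def Spec_is_valid_inchikey (inchikey : String) (out : Bool) : Prop := out = is_valid_inchikey_alt inchikey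
instance (inchikey : String) (out : Bool) : Decidable (Spec_is_valid_inchikey inchikey out) := by unfold Spec_is_valid_inchikey; infer_instance

-- ===== CLAIM (what is proved, stated in full; the proofs are below) =====
def Claim_equal_is_valid_inchikey : Prop := ∀ (inchikey : String), Dom_is_valid_inchikey inchikey → Spec_is_valid_inchikey inchikey (is_valid_inchikey inchikey)

-- ===== LEMMAS AND PROOFS =====

theorem pv_sum_bools (l : List Bool) (a : Int) :
    l.foldl (fun acc b => if b then acc + 1 else acc) a = a + (l.countP (fun b => b) : Int) := by
  induction l generalizing a with
  | nil => simp
  | cons b bs ih => cases b <;> simp [List.countP_cons, ih] <;> ring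

theorem pv_decomp (t : List Char) (h : t.length = 27) :
    t = t.take 14 ++ t[14]'(by omega) :: ((t.drop 15).take 10 ++ t[25]'(by omega) :: t.drop 26) := by
  have e1 : t.drop 14 = t[14]'(by omega) :: t.drop 15 := List.drop_eq_getElem_cons (by omega)
  have e2 : t.drop 25 = t[25]'(by omega) :: t.drop 26 := List.drop_eq_getElem_cons (by omega)
  have e3 : t.drop 15 = (t.drop 15).take 10 ++ t.drop 25 := by
    conv_lhs => rw [← List.take_append_drop 10 (t.drop 15)]
    rw [List.drop_drop]
  conv_lhs => rw [← List.take_append_drop 14 t, e1, e3, e2]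

theorem pv_isalpha_dash : PySem.Chars.isalpha '-' = false := by decide

theorem pv_count_iff (t : List Char) (h : t.length = 27)
    (d14 : t[14]'(by omega) = '-') (d25 : t[25]'(by omega) = '-') :
    ((t.countP (fun c => PySem.Chars.isalpha c) : Int) = 25) ↔
      ((t.take 14).all PySem.Chars.isalpha = true ∧
       ((t.drop 15).take 10).all PySem.Chars.isalpha = true ∧
       (t.drop 26).all PySem.Chars.isalpha = true) := by
  have hc : t.countP (fun c => PySem.Chars.isalpha c)
      = (t.take 14).countP PySem.Chars.isalpha
        + ((t.drop 15).take 10).countP PySem.Chars.isalpha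
        + (t.drop 26).countP PySem.Chars.isalpha := by
    conv_lhs => rw [pv_decomp t h]
    simp [List.countP_append, List.countP_cons, d14, d25, pv_isalpha_dash]
    ring
  have l1 : (t.take 14).length = 14 := by simp [List.length_take]; omega
  have l2 : ((t.drop 15).take 10).length = 10 := by simp [List.length_take, List.length_drop]; omega
  have l3 : (t.drop 26).length = 1 := by simp [List.length_drop]; omega
  have b1 := List.countP_le_length (l := t.take 14) (p := PySem.Chars.isalpha)
  have b2 := List.countP_le_length (l := (t.drop 15).take 10) (p := PySem.Chars.isalpha)
  have b3 := List.countP_le_length (l := t.drop 26) (p := PySem.Chars.isalpha)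
  rw [l1] at b1; rw [l2] at b2; rw [l3] at b3
  rw [List.all_eq_true, List.all_eq_true, List.all_eq_true]
  rw [← List.countP_eq_length, ← List.countP_eq_length, ← List.countP_eq_length]
  rw [l1, l2, l3]
  constructor
  · intro he
    have : t.countP (fun c => PySem.Chars.isalpha c) = 25 := by exact_mod_cast he
    omega
  · intro ⟨ha, hb, hcc⟩
    have : t.countP (fun c => PySem.Chars.isalpha c) = 25 := by omega
    exact_mod_cast this

theorem pv_core_eq (t : List Char) :
    (if ¬ (t.length = 27) then false
     else
       match PySem.List.pyGet? t (14 : Int), PySem.List.pyGet? t (25 : Int) with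
       | some c14, some c25 =>
         if ¬ (c14 = '-' ∧ c25 = '-') then false
         else
           decide ((t.map (fun c => PySem.Chars.isalpha c)).foldl
             (fun acc b => if b then acc + 1 else acc) (0 : Int) = 25)
       | _, _ => false)
    =
    (decide (t.length = 27)
      && PySem.Chars.strIsalpha (PySem.List.slice t none (some (14 : Int)))
      && decide (PySem.List.pyGet? t (14 : Int) = some '-')
      && PySem.Chars.strIsalpha (PySem.List.slice t (some (15 : Int)) (some (25 : Int)))
      && decide (PySem.List.pyGet? t (25 : Int) = some '-')
      && PySem.Chars.strIsalpha (PySem.List.slice t (some (26 : Int)) none)) := by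
  by_cases h : t.length = 27
  · have h14 : 14 < t.length := by omega
    have h25 : 25 < t.length := by omega
    have g14 : PySem.List.pyGet? t (14 : Int) = some (t[14]'h14) := by
      rw [show (14 : Int) = ((14 : Nat) : Int) by norm_num, PySem.List.pyGet?_natCast]
      exact List.getElem?_eq_getElem h14
    have g25 : PySem.List.pyGet? t (25 : Int) = some (t[25]'h25) := by
      rw [show (25 : Int) = ((25 : Nat) : Int) by norm_num, PySem.List.pyGet?_natCast]
      exact List.getElem?_eq_getElem h25
    have s1 : PySem.List.slice t none (some (14 : Int)) = t.take (Int.toNat 14) := by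
      rw [PySem.List.slice_to t (by norm_num : (0:Int) ≤ 14)]
    have s2 : PySem.List.slice t (some (15 : Int)) (some (25 : Int)) = (t.drop (Int.toNat 15)).take (Int.toNat 25 - Int.toNat 15) := by
      rw [PySem.List.slice_toNat t (by norm_num : (0:Int) ≤ 15) (by norm_num : (0:Int) ≤ 25)]
    have s3 : PySem.List.slice t (some (26 : Int)) none = t.drop (Int.toNat 26) := by
      rw [PySem.List.slice_from t (by norm_num : (0:Int) ≤ 26)]
    rw [g14, g25, s1, s2, s3]
    have ht1 : Int.toNat 14 = 14 := rfl
    have ht2 : Int.toNat 15 = 15 := rfl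
    have ht3 : Int.toNat 25 - Int.toNat 15 = 10 := rfl
    have ht4 : Int.toNat 26 = 26 := rfl
    rw [ht1, ht3, ht2, ht4]
    simp only [h, not_true_eq_false, if_false]
    have l1 : (t.take 14).length = 14 := by simp [List.length_take]; omega
    have l2 : ((t.drop 15).take 10).length = 10 := by simp [List.length_take, List.length_drop]; omega
    have l3 : (t.drop 26).length = 1 := by simp [List.length_drop]; omega
    by_cases hd : t[14]'h14 = '-' ∧ t[25]'h25 = '-'
    · obtain ⟨d14, d25⟩ := hd
      simp only [d14, d25, and_self, not_true_eq_false, if_false]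
      rw [pv_sum_bools, List.countP_map]
      have hcomp : ((fun b => b) ∘ fun c => PySem.Chars.isalpha c) = (fun c => PySem.Chars.isalpha c) := rfl
      rw [hcomp, zero_add]
      have ie1 : (t.take 14).isEmpty = false := by
        rw [List.isEmpty_eq_false_iff]; exact List.ne_nil_of_length_pos (by omega)
      have ie2 : ((t.drop 15).take 10).isEmpty = false := by
        rw [List.isEmpty_eq_false_iff]; exact List.ne_nil_of_length_pos (by omega)
      have ie3 : (t.drop 26).isEmpty = false := by
        rw [List.isEmpty_eq_false_iff]; exact List.ne_nil_of_length_pos (by omega)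
      have hiff := pv_count_iff t h d14 d25
      simp only [PySem.Chars.strIsalpha, ie1, ie2, ie3, Bool.not_false, Bool.true_and]
      cases e1 : (List.take 14 t).all PySem.Chars.isalpha <;>
        cases e2 : (List.take 10 (List.drop 15 t)).all PySem.Chars.isalpha <;>
          cases e3 : (List.drop 26 t).all PySem.Chars.isalpha <;>
            simp_all
    · rcases not_and_or.mp hd with hx | hx
      · simp [hd, hx]
      · simp [hd, hx]
  · simp [h]

-- ===== VERDICT (by name: the statement is the Claim_ definition above) =====
theorem is_valid_inchikey_spec : Claim_equal_is_valid_inchikey := by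
  intro s _
  unfold Spec_is_valid_inchikey is_valid_inchikey is_valid_inchikey_alt
  exact pv_core_eq _
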